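-- pv_equiv track=rewrite | github.com/cld2labs/OmniRoute | server/api/services/data_engine/seed.py | _iter_route_blueprints
-- ===== SOURCE A (Python) =====
-- from itertools import cycle, islice
--
-- ROUTE_BLUEPRINTS = [
--     ('Pacific Connector', 'Los Angeles', 'San Diego'),
--     ('Valley Express', 'Fresno', 'Sacramento'),
--     ('Capital Link', 'Sacramento', 'San Jose'),
--     ('Coastal Runner', 'Santa Barbara', 'Monterey'),
--     ('Metro North', 'Los Angeles', 'Bakersfield'),
--     ('Sierra Loop', 'Reno', 'Sacramento'),
--     ('Sunset Corridor', 'San Diego', 'Irvine'),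
--     ('Golden Gate Shuttle', 'San Jose', 'San Francisco'),
--     ('Desert Line', 'Palm Springs', 'Los Angeles'),
--     ('Capitol Commuter', 'Oakland', 'Sacramento'),
--     ('Bay Connector', 'San Francisco', 'San Jose'),
--     ('Central Corridor', 'Modesto', 'Stockton'),
-- ]
--
-- def _iter_route_blueprints(route_count: int) -> list[tuple[str, str, str]]:
--     variants: list[tuple[str, str, str]] = []
--     for index, (route_name, origin, destination) in enumerate(islice(cycle(ROUTE_BLUEPRINTS), route_count), start=1):
--         if index <= len(ROUTE_BLUEPRINTS):
--             variants.append((route_name, origin, destination))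
--             continue
--         variants.append((f'{route_name} {index}', origin, destination))
--     return variants
-- ===== SOURCE B (Python) =====
-- ROUTE_BLUEPRINTS = [
--     ('Pacific Connector', 'Los Angeles', 'San Diego'),
--     ('Valley Express', 'Fresno', 'Sacramento'),
--     ('Capital Link', 'Sacramento', 'San Jose'),
--     ('Coastal Runner', 'Santa Barbara', 'Monterey'),
--     ('Metro North', 'Los Angeles', 'Bakersfield'),
--     ('Sierra Loop', 'Reno', 'Sacramento'),
--     ('Sunset Corridor', 'San Diego', 'Irvine'),
--     ('Golden Gate Shuttle', 'San Jose', 'San Francisco'),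
--     ('Desert Line', 'Palm Springs', 'Los Angeles'),
--     ('Capitol Commuter', 'Oakland', 'Sacramento'),
--     ('Bay Connector', 'San Francisco', 'San Jose'),
--     ('Central Corridor', 'Modesto', 'Stockton'),
-- ]
--
-- def _iter_route_blueprints(route_count):
--     # Whole-cycle construction: materialise complete 12-entry blocks (the base
--     # table, then one fully renamed copy per extra cycle), concatenate and
--     # truncate to route_count -- no per-element branch or modular arithmetic.
--     k = len(ROUTE_BLUEPRINTS)
--     blocks = [list(ROUTE_BLUEPRINTS)]
--     for c in range(1, -(-route_count // k)):
--         blocks.append([(f'{name} {c * k + i + 1}', origin, destination)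
--                        for i, (name, origin, destination) in enumerate(ROUTE_BLUEPRINTS)])
--     flat = [bp for block in blocks for bp in block]
--     return flat[:route_count]
-- ===== Notes on version B (the rewrite author's own statement) =====
-- stated objective: alternative
-- what changed: A walks islice(cycle(...)) element by element with a per-element index branch; B instead materialises whole table-sized blocks (the base table plus one fully renamed copy per extra cycle), concatenates them and truncates the flat list to route_count, so there is no per-element branch and no element-level cycling.
import Mathlib
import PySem

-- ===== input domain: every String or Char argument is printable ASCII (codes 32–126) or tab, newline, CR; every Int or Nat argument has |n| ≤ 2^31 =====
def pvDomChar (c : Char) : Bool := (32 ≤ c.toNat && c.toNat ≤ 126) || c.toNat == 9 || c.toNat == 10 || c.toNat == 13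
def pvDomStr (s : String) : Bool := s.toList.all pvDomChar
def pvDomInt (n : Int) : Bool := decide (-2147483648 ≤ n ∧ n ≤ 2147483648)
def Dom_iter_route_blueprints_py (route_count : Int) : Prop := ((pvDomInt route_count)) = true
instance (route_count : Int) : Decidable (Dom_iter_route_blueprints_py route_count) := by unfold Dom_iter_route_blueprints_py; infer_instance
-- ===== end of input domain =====

-- B replaces A's element-by-element enumerate-over-cycle loop (with its per-element index branch)
-- by whole-cycle construction: build complete table-sized blocks (base table + one fully renamed copy
-- per extra cycle), concatenate, truncate to route_count; return value only.

def pvRouteBlueprints : List (String × String × String) :=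
  [("Pacific Connector", "Los Angeles", "San Diego"),
   ("Valley Express", "Fresno", "Sacramento"),
   ("Capital Link", "Sacramento", "San Jose"),
   ("Coastal Runner", "Santa Barbara", "Monterey"),
   ("Metro North", "Los Angeles", "Bakersfield"),
   ("Sierra Loop", "Reno", "Sacramento"),
   ("Sunset Corridor", "San Diego", "Irvine"),
   ("Golden Gate Shuttle", "San Jose", "San Francisco"),
   ("Desert Line", "Palm Springs", "Los Angeles"),
   ("Capitol Commuter", "Oakland", "Sacramento"),
   ("Bay Connector", "San Francisco", "San Jose"),
   ("Central Corridor", "Modesto", "Stockton")]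

-- ===== PORT A =====
-- islice(cycle(ROUTE_BLUEPRINTS), n): the first n elements of the cycled list
def pvCycleTake (n : Nat) : List (String × String × String) :=
  (List.range n).map (fun j => pvRouteBlueprints.getD (j % pvRouteBlueprints.length) ("", "", ""))

def iter_route_blueprints_py (route_count : Int) : List (String × String × String) :=
  (PySem.List.enumerate (pvCycleTake route_count.toNat) 1).foldl
    (fun variants p =>
      if p.1 ≤ (pvRouteBlueprints.length : Int) then
        variants ++ [(p.2.1, p.2.2.1, p.2.2.2)]
      else
        variants ++ [(p.2.1 ++ " " ++ PySem.Int.toStr p.1, p.2.2.1, p.2.2.2)]) []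

-- ===== PORT B =====
def iter_route_blueprints_py_alt (route_count : Int) : List (String × String × String) :=
  let k : Int := pvRouteBlueprints.length
  let blocks : List (List (String × String × String)) :=
    (PySem.List.pyRange 1 (-(PySem.Int.floordiv (-route_count) k)) 1).foldl
      (fun bs c => bs ++ [(PySem.List.enumerate pvRouteBlueprints 0).map
        (fun p => (p.2.1 ++ " " ++ PySem.Int.toStr (c * k + p.1 + 1), p.2.2.1, p.2.2.2))])
      [pvRouteBlueprints]
  let flat := blocks.flatMap (fun block => block)
  PySem.List.slice flat none (some route_count)

-- ===== PRECONDITION & SPEC =====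
-- Pre_ excludes negative route_count, on which A's islice raises ValueError.
def Pre_iter_route_blueprints_py (route_count : Int) : Prop := 0 ≤ route_count
instance (route_count : Int) : Decidable (Pre_iter_route_blueprints_py route_count) := by
  unfold Pre_iter_route_blueprints_py; infer_instance

def pvWitness_iter_route_blueprints_py : Int := 15

def Spec_iter_route_blueprints_py (route_count : Int) (out : List (String × String × String)) : Prop :=
  out = iter_route_blueprints_py_alt route_count
instance (route_count : Int) (out : List (String × String × String)) :
    Decidable (Spec_iter_route_blueprints_py route_count out) := by
  unfold Spec_iter_route_blueprints_py; infer_instance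

-- ===== CLAIM =====
def Claim_equal_iter_route_blueprints_py : Prop :=
  ∀ (route_count : Int), Dom_iter_route_blueprints_py route_count →
    Pre_iter_route_blueprints_py route_count →
    Spec_iter_route_blueprints_py route_count (iter_route_blueprints_py route_count)

-- ===== LEMMAS AND PROOFS =====

-- common normal form: both ports equal (List.range m).map pvG for m = route_count.toNat
def pvG (j : Nat) : String × String × String :=
  let b := pvRouteBlueprints.getD (j % 12) ("", "", "")
  if j + 1 ≤ 12 then b
  else (b.1 ++ " " ++ PySem.Int.toStr (1 + (j : Int)), b.2.1, b.2.2)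

theorem pvA_foldl (xs : List (String × String × String)) (s : Int)
    (acc : List (String × String × String)) :
    (PySem.List.enumerate xs s).foldl
      (fun variants p =>
        if p.1 ≤ (pvRouteBlueprints.length : Int) then
          variants ++ [(p.2.1, p.2.2.1, p.2.2.2)]
        else
          variants ++ [(p.2.1 ++ " " ++ PySem.Int.toStr p.1, p.2.2.1, p.2.2.2)]) acc
    = acc ++ (PySem.List.enumerate xs s).map
        (fun p =>
          if p.1 ≤ (pvRouteBlueprints.length : Int) then (p.2.1, p.2.2.1, p.2.2.2)
          else (p.2.1 ++ " " ++ PySem.Int.toStr p.1, p.2.2.1, p.2.2.2)) := by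
  induction xs generalizing s acc with
  | nil => simp [PySem.List.enumerate_nil]
  | cons x xs ih =>
      rw [PySem.List.enumerate_cons]
      simp only [List.foldl_cons, List.map_cons, ih]
      split <;> simp

theorem pvA_normal (m : Nat) :
    iter_route_blueprints_py (m : Int) = (List.range m).map pvG := by
  induction m with
  | zero => simp [iter_route_blueprints_py, pvCycleTake, PySem.List.enumerate_nil]
  | succ m ih =>
      have hcyc : pvCycleTake (m + 1) = pvCycleTake m ++
          [pvRouteBlueprints.getD (m % pvRouteBlueprints.length) ("", "", "")] := by
        simp [pvCycleTake, List.range_succ]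
      have hlen : (pvCycleTake m).length = m := by
        simp [pvCycleTake]
      unfold iter_route_blueprints_py at ih ⊢
      rw [Int.toNat_natCast] at ih ⊢
      rw [hcyc, PySem.List.enumerate_append, List.foldl_append, pvA_foldl, pvA_foldl, hlen,
        PySem.List.enumerate_cons, PySem.List.enumerate_nil]
      rw [pvA_foldl, List.nil_append] at ih
      simp only [List.nil_append]
      rw [List.range_succ, List.map_append, ← ih]
      simp only [List.map_cons, List.map_nil]
      congr 1
      have hlen12 : pvRouteBlueprints.length = 12 := by decide
      simp only [hlen12, pvG]
      by_cases h : m + 1 ≤ 12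
      · rw [if_pos (by push_cast; omega : (1 : Int) + (m : Int) ≤ ((12 : Nat) : Int)), if_pos h]
      · rw [if_neg (by push_cast; omega : ¬ ((1 : Int) + (m : Int) ≤ ((12 : Nat) : Int))), if_neg h]

-- (l.map f).flatMap g = l.flatMap (g after f): small glue fact for the block flatten
theorem pvFlatMap_map {A B C : Type} (l : List A) (f : A → B) (g : B → List C) :
    (l.map f).flatMap g = l.flatMap (fun x => g (f x)) := by
  induction l with
  | nil => rfl
  | cons a l ih => simp only [List.map_cons, List.flatMap_cons, ih]

-- one fully renamed block (cycle number c ≥ 1) is a window of the normal form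
theorem pvBlock_eq (c : Nat) (hc : 1 ≤ c) :
    (PySem.List.enumerate pvRouteBlueprints 0).map
      (fun p => (p.2.1 ++ " " ++ PySem.Int.toStr (((c : Nat) : Int) * ((12 : Nat) : Int) + p.1 + 1),
                 p.2.2.1, p.2.2.2))
    = (List.range 12).map (fun i => pvG (12 * c + i)) := by
  rw [PySem.List.enumerate_eq_map_pyRange pvRouteBlueprints ("", "", "")]
  have hlen : PySem.List.len pvRouteBlueprints = (12 : Int) := by decide
  rw [hlen]
  have h12 : (PySem.List.pyRange 0 12 1) = (List.range 12).map (fun i : Nat => (i : Int)) := by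
    decide
  rw [h12, List.map_map, List.map_map]
  apply List.map_congr_left
  intro i hi
  rw [List.mem_range] at hi
  have hmod : (12 * c + i) % 12 = i := by omega
  have harg : ((c : Nat) : Int) * ((12 : Nat) : Int) + ((i : Nat) : Int) + 1
      = 1 + (((12 * c + i : Nat) : Nat) : Int) := by push_cast; ring
  simp only [Function.comp_apply, pvG, hmod, PySem.List.pyGetD_natCast]
  rw [if_neg (by omega), harg]

-- the renamed blocks for cycles 1..u concatenated = the tail window of the normal form
theorem pvTail_eq (u : Nat) :
    (List.range u).flatMap (fun j => (List.range 12).map (fun i => pvG (12 * (1 + j) + i)))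
    = (List.range (12 * u)).map (fun i => pvG (12 + i)) := by
  induction u with
  | zero => simp
  | succ u ih =>
      rw [show List.range (u + 1) = List.range u ++ [u] from List.range_succ,
        List.flatMap_append, ih,
        show 12 * (u + 1) = 12 * u + 12 from by ring,
        List.range_add, List.map_append]
      congr 1
      simp only [List.flatMap_cons, List.flatMap_nil, List.append_nil, List.map_map]
      apply List.map_congr_left
      intro i _
      simp only [Function.comp_apply]
      congr 1
      omega

theorem pvBase_eq : pvRouteBlueprints = (List.range 12).map pvG := by decide

theorem pvB_normal (m : Nat) :
    iter_route_blueprints_py_alt (m : Int) = (List.range m).map pvG := by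
  have hlen12 : pvRouteBlueprints.length = 12 := by decide
  set t : Nat := (m + 11) / 12 with ht
  have hT : -(PySem.Int.floordiv (-(m : Int)) ((pvRouteBlueprints.length : Nat) : Int))
      = ((t : Nat) : Int) := by
    rw [hlen12]
    rw [PySem.Int.neg_floordiv_neg_eq_iff_of_pos (by norm_num)]
    constructor <;> (push_cast; omega)
  simp only [iter_route_blueprints_py_alt]
  rw [hT, PySem.List.foldl_append_singleton_eq_map, PySem.List.pyRange_one]
  have htn : (((t : Nat) : Int) - 1).toNat = t - 1 := by omega
  rw [htn, PySem.List.slice_to_natCast, List.flatMap_append, pvFlatMap_map]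
  simp only [List.flatMap_cons, List.flatMap_nil, List.append_nil]
  have hblocks : (List.range (t - 1)).flatMap (fun j : Nat =>
      (PySem.List.enumerate pvRouteBlueprints 0).map
        (fun p => (p.2.1 ++ " " ++ PySem.Int.toStr
            ((1 + (j : Int)) * ((pvRouteBlueprints.length : Nat) : Int) + p.1 + 1),
          p.2.2.1, p.2.2.2)))
      = (List.range (12 * (t - 1))).map (fun i => pvG (12 + i)) := by
    rw [hlen12, ← pvTail_eq]
    apply List.flatMap_congr
    intro j _
    have hc : (1 : Int) + (j : Int) = (((1 + j : Nat) : Nat) : Int) := by push_cast; ring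
    rw [hc, pvBlock_eq (1 + j) (by omega)]
  rw [pvFlatMap_map, hblocks]
  have hflat : pvRouteBlueprints ++ (List.range (12 * (t - 1))).map (fun i => pvG (12 + i))
      = (List.range (12 + 12 * (t - 1))).map pvG := by
    rw [List.range_add, List.map_append, List.map_map, pvBase_eq]
    rfl
  rw [hflat, ← List.map_take, List.take_range]
  have hmin : min m (12 + 12 * (t - 1)) = m := by omega
  rw [hmin]

-- ===== VERDICT =====
theorem iter_route_blueprints_py_spec : Claim_equal_iter_route_blueprints_py := by
  intro n _ hpre
  unfold Spec_iter_route_blueprints_py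
  obtain ⟨m, rfl⟩ := Int.eq_ofNat_of_zero_le hpre
  rw [pvA_normal, pvB_normal]
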